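-- pv_equiv track=rewrite | github.com/openverse-orca/OrcaPlayground | envs/common/model_scanner.py | _collect_matches_by_prefix
-- ===== SOURCE A (Python) =====
-- from collections import defaultdict
--
-- def _split_tokens(name: str) -> list[str]:
--     return [token for token in name.split("_") if token]
--
-- def _match_prefix(full_name: str, suffix: str) -> str | None:
--     full_tokens = _split_tokens(full_name)
--     suffix_tokens = _split_tokens(suffix)
--     if not suffix_tokens:
--         return None
--
--     if len(full_tokens) < len(suffix_tokens):
--         return None
--
--     if full_tokens[-len(suffix_tokens):] != suffix_tokens:
--         return None
--
--     prefix_tokens = full_tokens[:-len(suffix_tokens)]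
--     return "_".join(prefix_tokens)
--
-- def _collect_matches_by_prefix(required_suffixes: list[str], available_names: set[str]) -> dict[str, dict[str, str]]:
--     matches_by_prefix: dict[str, dict[str, str]] = defaultdict(dict)
--     for suffix in required_suffixes:
--         for full_name in available_names:
--             prefix = _match_prefix(full_name, suffix)
--             if prefix is None:
--                 continue
--             matches_by_prefix[prefix][suffix] = full_name
--     return dict(matches_by_prefix)
-- ===== SOURCE B (Python) =====
-- def _collect_matches_by_prefix(required_suffixes, available_names):
--     # Tokenize every name once and index each of its token-suffixes by the
--     # token tuple; each required suffix is then a single dict lookup.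
--     index = {}
--     for full_name in available_names:
--         tokens = [t for t in full_name.split("_") if t]
--         for key, entry in [
--             (tuple(tokens[i:]), (full_name, "_".join(tokens[:i])))
--             for i in range(len(tokens))
--         ]:
--             index.setdefault(key, []).append(entry)
--     matches_by_prefix = {}
--     for suffix in required_suffixes:
--         key = tuple(t for t in suffix.split("_") if t)
--         if not key:
--             continue
--         for full_name, prefix in index.get(key, ()):
--             matches_by_prefix.setdefault(prefix, {})[suffix] = full_name
--     return matches_by_prefix
-- ===== Notes on version B (the rewrite author's own statement) =====
-- stated objective: faster
-- what changed: A re-splits every available name for every required suffix (nested suffix x name scan); B tokenizes each name once, builds a dict indexing every token-suffix of every name to its (name, prefix) entry, and then answers each required suffix with a single dict lookup.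
import Mathlib
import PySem

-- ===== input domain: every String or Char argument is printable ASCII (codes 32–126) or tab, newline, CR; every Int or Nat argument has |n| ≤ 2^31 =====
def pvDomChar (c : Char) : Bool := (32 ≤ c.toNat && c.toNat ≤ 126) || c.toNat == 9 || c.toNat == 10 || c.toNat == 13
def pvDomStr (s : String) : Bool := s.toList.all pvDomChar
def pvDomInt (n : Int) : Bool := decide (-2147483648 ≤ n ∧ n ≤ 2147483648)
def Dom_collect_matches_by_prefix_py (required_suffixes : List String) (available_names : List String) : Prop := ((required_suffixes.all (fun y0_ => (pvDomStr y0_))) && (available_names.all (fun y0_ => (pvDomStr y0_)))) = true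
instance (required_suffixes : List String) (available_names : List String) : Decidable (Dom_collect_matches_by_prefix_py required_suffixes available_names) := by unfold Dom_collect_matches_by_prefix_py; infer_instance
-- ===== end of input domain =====

-- B replaces A's suffix × name rescan (re-splitting every name for every suffix) by a
-- one-pass index from token-suffix keys to (name, prefix) entries; each required suffix
-- becomes one dict lookup. Objective: faster (asymptotic in the number of suffixes).

-- ===== PORT A =====
-- _split_tokens: name.split("_") always succeeds (sep is the nonempty literal "_"), so .getD [] is unreachable
def pySplitTokens (name : String) : List String :=
  ((PySem.Str.split? name "_").getD []).filter (fun t => t != "")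

-- _match_prefix
def pyMatchPrefix (full_name : String) (suffix : String) : Option String :=
  let full_tokens := pySplitTokens full_name
  let suffix_tokens := pySplitTokens suffix
  if suffix_tokens.isEmpty then none
  else if full_tokens.length < suffix_tokens.length then none
  else if PySem.List.slice full_tokens (some (-(suffix_tokens.length : Int))) none ≠ suffix_tokens then none
  else some (PySem.Str.join "_" (PySem.List.slice full_tokens none (some (-(suffix_tokens.length : Int)))))

def collect_matches_by_prefix_py (required_suffixes : List String) (available_names : List String) : List (String × List (String × String)) :=
  (required_suffixes.foldl (fun (m : PySem.Dict String (PySem.Dict String String)) suffix =>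
      available_names.foldl (fun m full_name =>
        match pyMatchPrefix full_name suffix with
        | none => m
        | some pre => m.modify pre PySem.Dict.empty (fun inner => inner.insert suffix full_name)) m)
    PySem.Dict.empty).items.map (fun p => (p.1, p.2.items))

-- ===== PORT B =====
-- Source B's token comprehension is the same expression as _split_tokens; the port reuses pySplitTokens
-- the index built once over available_names: token-suffix key ↦ list of (full_name, prefix)
def altIndex (available_names : List String) : PySem.Dict (List String) (List (String × String)) :=
  available_names.foldl (fun d full_name =>
    let tokens := pySplitTokens full_name
    ((List.range tokens.length).map (fun i : Nat =>
        (PySem.List.slice tokens (some (i : Int)) none,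
         (full_name, PySem.Str.join "_" (PySem.List.slice tokens none (some (i : Int))))))).foldl
      (fun d p => d.modify p.1 [] (fun l => l ++ [p.2])) d)
    PySem.Dict.empty

def collect_matches_by_prefix_py_alt (required_suffixes : List String) (available_names : List String) : List (String × List (String × String)) :=
  let index := altIndex available_names
  (required_suffixes.foldl (fun (m : PySem.Dict String (PySem.Dict String String)) suffix =>
      let key := pySplitTokens suffix
      if key.isEmpty then m
      else (index.getD key []).foldl (fun m p =>
          m.modify p.2 PySem.Dict.empty (fun inner => inner.insert suffix p.1)) m)
    PySem.Dict.empty).items.map (fun p => (p.1, p.2.items))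

-- ===== PRECONDITION & SPEC =====
def Spec_collect_matches_by_prefix_py (required_suffixes : List String) (available_names : List String) (out : List (String × List (String × String))) : Prop := out = collect_matches_by_prefix_py_alt required_suffixes available_names
instance (required_suffixes : List String) (available_names : List String) (out : List (String × List (String × String))) : Decidable (Spec_collect_matches_by_prefix_py required_suffixes available_names out) := by unfold Spec_collect_matches_by_prefix_py; infer_instance

-- ===== CLAIM (what is proved, stated in full; the proofs are below) =====
def Claim_equal_collect_matches_by_prefix_py : Prop := ∀ (required_suffixes : List String) (available_names : List String), Dom_collect_matches_by_prefix_py required_suffixes available_names → Spec_collect_matches_by_prefix_py required_suffixes available_names (collect_matches_by_prefix_py required_suffixes available_names)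

-- ===== LEMMAS AND PROOFS =====

lemma pv_slice_neg_from {α : Type} (xs : List α) (L : Nat) (h1 : 1 ≤ L) (h : L ≤ xs.length) :
    PySem.List.slice xs (some (-(L : Int))) none = xs.drop (xs.length - L) := by
  have hc : PySem.List.clampIdx xs.length (-(L : Int)) = xs.length - L := by
    unfold PySem.List.clampIdx; split_ifs <;> omega
  simp [PySem.List.slice, hc]

lemma pv_slice_neg_to {α : Type} (xs : List α) (L : Nat) (h1 : 1 ≤ L) (h : L ≤ xs.length) :
    PySem.List.slice xs none (some (-(L : Int))) = xs.take (xs.length - L) := by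
  have hc : PySem.List.clampIdx xs.length (-(L : Int)) = xs.length - L := by
    unfold PySem.List.clampIdx; split_ifs <;> omega
  simp [PySem.List.slice, hc]

-- the (name, prefix) entry the index holds for a given key, as an Option
def pvDelta (key : List String) (name : String) : Option (String × String) :=
  let toks := pySplitTokens name
  if key ≠ [] ∧ key.length ≤ toks.length ∧ toks.drop (toks.length - key.length) = key
  then some (name, PySem.Str.join "_" (toks.take (toks.length - key.length))) else none

lemma pv_filter_range (toks key : List String) :
    (List.range toks.length).filter (fun i => toks.drop i == key)
      = if key ≠ [] ∧ key.length ≤ toks.length ∧ toks.drop (toks.length - key.length) = key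
        then [toks.length - key.length] else [] := by
  split_ifs with hc
  · obtain ⟨hne, hle, hdrop⟩ := hc
    have hL : 1 ≤ key.length := List.length_pos_iff.mpr hne
    rw [List.filter_congr (q := fun i => i == toks.length - key.length)]
    · rw [List.filter_beq, List.count_range]
      have : toks.length - key.length < toks.length := by omega
      simp [this]
    · intro i hi
      simp only [List.mem_range] at hi
      rw [Bool.eq_iff_iff]
      simp only [beq_iff_eq]
      constructor
      · intro h
        have := congrArg List.length h
        simp only [List.length_drop] at this
        omega
      · intro h; rw [h]; exact hdrop
  · rw [List.filter_eq_nil_iff]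
    intro i hi hbeq
    simp only [List.mem_range] at hi
    simp only [beq_iff_eq] at hbeq
    have hlen := congrArg List.length hbeq
    simp only [List.length_drop] at hlen
    apply hc
    refine ⟨?_, by omega, ?_⟩
    · intro hk; rw [hk] at hlen; simp at hlen; omega
    · have : toks.length - key.length = i := by omega
      rw [this]; exact hbeq

lemma pv_index_getD (available_names : List String) (key : List String) :
    (altIndex available_names).getD key [] = available_names.filterMap (pvDelta key) := by
  unfold altIndex
  suffices h : ∀ (ns : List String) (d : PySem.Dict (List String) (List (String × String))),
      (ns.foldl (fun d full_name =>
        let tokens := pySplitTokens full_name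
        ((List.range tokens.length).map (fun i : Nat =>
            (PySem.List.slice tokens (some (i : Int)) none,
             (full_name, PySem.Str.join "_" (PySem.List.slice tokens none (some (i : Int))))))).foldl
          (fun d p => d.modify p.1 [] (fun l => l ++ [p.2])) d) d).getD key []
      = d.getD key [] ++ ns.filterMap (pvDelta key) by
    rw [h]; simp [PySem.Dict.getD, PySem.Dict.get?, PySem.Dict.empty]
  intro ns
  induction ns with
  | nil => intro d; simp
  | cons name ns ih =>
    intro d
    simp only [List.foldl_cons, ih]
    have hstep : ∀ (d : PySem.Dict (List String) (List (String × String))),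
        (((List.range (pySplitTokens name).length).map (fun i : Nat =>
            (PySem.List.slice (pySplitTokens name) (some (i : Int)) none,
             (name, PySem.Str.join "_" (PySem.List.slice (pySplitTokens name) none (some (i : Int))))))).foldl
          (fun d p => d.modify p.1 [] (fun l => l ++ [p.2])) d).getD key []
        = d.getD key [] ++ (pvDelta key name).toList := by
      intro d
      rw [PySem.Dict.getD_foldl_modify_append]
      congr 1
      have htok : ∀ i : Nat, PySem.List.slice (pySplitTokens name) (some (i : Int)) none = (pySplitTokens name).drop i := by
        intro i
        rw [PySem.List.slice_from _ (by positivity)]; simp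
      have htak : ∀ i : Nat, PySem.List.slice (pySplitTokens name) none (some (i : Int)) = (pySplitTokens name).take i := by
        intro i
        rw [PySem.List.slice_to _ (by positivity)]; simp
      simp only [htok, htak, List.filter_map]
      have : ((List.range (pySplitTokens name).length).filter
          (fun i => (pySplitTokens name).drop i == key)) =
          (List.range (pySplitTokens name).length).filter
            ((fun p : List String × String × String => p.1 == key) ∘
              (fun i => ((pySplitTokens name).drop i, (name, PySem.Str.join "_" ((pySplitTokens name).take i))))) := rfl
      rw [← this, pv_filter_range (pySplitTokens name) key]
      unfold pvDelta
      split_ifs with hif <;> simp [hif]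
    rw [hstep, List.filterMap_cons]
    cases pvDelta key name <;> simp

lemma pv_match_eq_delta (suffix name : String) :
    (pyMatchPrefix name suffix).map (fun pre => (name, pre)) = pvDelta (pySplitTokens suffix) name := by
  unfold pyMatchPrefix pvDelta
  set st := pySplitTokens suffix with hst
  set toks := pySplitTokens name with htk
  by_cases hne : st = []
  · simp [hne]
  · have hL : 1 ≤ st.length := List.length_pos_iff.mpr hne
    have hemp : st.isEmpty = false := by simpa using hne
    simp only [hemp, Bool.false_eq_true, if_false]
    by_cases hlen : toks.length < st.length
    · have : ¬ (st ≠ [] ∧ st.length ≤ toks.length ∧ toks.drop (toks.length - st.length) = st) := by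
        intro ⟨_, h2, _⟩; omega
      simp [hlen, this]
    · have hle : st.length ≤ toks.length := by omega
      rw [if_neg hlen]
      rw [pv_slice_neg_from toks st.length hL hle, pv_slice_neg_to toks st.length hL hle]
      by_cases hdrop : toks.drop (toks.length - st.length) = st
      · simp [hdrop, hne, hle]
      · simp [hdrop, hne, hle]

lemma pv_step_eq (available_names : List String) (suffix : String)
    (m : PySem.Dict String (PySem.Dict String String)) :
    available_names.foldl (fun m full_name =>
        match pyMatchPrefix full_name suffix with
        | none => m
        | some pre => m.modify pre PySem.Dict.empty (fun inner => inner.insert suffix full_name)) m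
    = (if (pySplitTokens suffix).isEmpty then m
       else ((altIndex available_names).getD (pySplitTokens suffix) []).foldl (fun m p =>
          m.modify p.2 PySem.Dict.empty (fun inner => inner.insert suffix p.1)) m) := by
  have hA : available_names.foldl (fun m full_name =>
        match pyMatchPrefix full_name suffix with
        | none => m
        | some pre => m.modify pre PySem.Dict.empty (fun inner => inner.insert suffix full_name)) m
      = (available_names.filterMap (pvDelta (pySplitTokens suffix))).foldl (fun m p =>
          m.modify p.2 PySem.Dict.empty (fun inner => inner.insert suffix p.1)) m := by
    rw [← List.filterMap_congr (f := fun name => (pyMatchPrefix name suffix).map (fun pre => (name, pre)))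
        (fun name _ => pv_match_eq_delta suffix name)]
    rw [List.foldl_filterMap]
    apply PySem.List.foldl_congr_mem
    intro acc a _
    cases pyMatchPrefix a suffix <;> simp
  by_cases hemp : (pySplitTokens suffix).isEmpty
  · rw [if_pos hemp, hA]
    have hnil : available_names.filterMap (pvDelta (pySplitTokens suffix)) = [] := by
      rw [List.filterMap_eq_nil_iff]
      intro name _
      unfold pvDelta
      have : pySplitTokens suffix = [] := List.isEmpty_iff.mp hemp
      simp [this]
    rw [hnil]; rfl
  · rw [if_neg hemp, hA, pv_index_getD]

-- ===== VERDICT (by name: the statement is the Claim_ definition above) =====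
theorem collect_matches_by_prefix_py_spec : Claim_equal_collect_matches_by_prefix_py := by
  intro required_suffixes available_names _
  unfold Spec_collect_matches_by_prefix_py
  simp only [collect_matches_by_prefix_py, collect_matches_by_prefix_py_alt]
  have h : ∀ (l : List String) (m : PySem.Dict String (PySem.Dict String String)),
      l.foldl (fun m suffix => available_names.foldl (fun m full_name =>
          match pyMatchPrefix full_name suffix with
          | none => m
          | some pre => m.modify pre PySem.Dict.empty (fun inner => inner.insert suffix full_name)) m) m
      = l.foldl (fun m suffix =>
          if (pySplitTokens suffix).isEmpty then m
          else (((altIndex available_names).getD (pySplitTokens suffix) []).foldl (fun m p =>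
              m.modify p.2 PySem.Dict.empty (fun inner => inner.insert suffix p.1)) m)) m := by
    intro l
    induction l with
    | nil => intro m; rfl
    | cons s l ih =>
      intro m
      simp only [List.foldl_cons]
      rw [pv_step_eq]
      exact ih _
  rw [h]
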